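-- pv_equiv track=rewrite | github.com/karishan1/MelodyAPI-AWS | app/utils/predict_instruments.py | smooth_timestamps
-- ===== SOURCE A (Python) =====
-- def smooth_timestamps(time_stamps, min_duration = 2):
--     if not time_stamps:
--         return []
--
--     filtered = []
--     temp_group = [time_stamps[0]]
--
--     for i in range(1, len(time_stamps)):
--         if time_stamps[i] == time_stamps[i - 1] + 1:
--             temp_group.append(time_stamps[i])
--         else:
--             if len(temp_group) >= min_duration:
--                 filtered.extend(temp_group)
--             temp_group = [time_stamps[i]]
--
--     if len(temp_group) >= min_duration:
--         filtered.extend(temp_group)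
--
--     return filtered
-- ===== SOURCE B (Python) =====
-- def smooth_timestamps(time_stamps, min_duration=2):
--     result = []
--     i, n = 0, len(time_stamps)
--     while i < n:
--         j = i + 1
--         while j < n and time_stamps[j] == time_stamps[j - 1] + 1:
--             j += 1
--         if j - i >= min_duration:
--             result.extend(time_stamps[i:j])
--         i = j
--     return result
-- ===== Notes on version B (the rewrite author's own statement) =====
-- stated objective: alternative
-- what changed: Replaces A's stateful temp_group accumulator loop with a two-pointer scan that delimits each maximal consecutive run by index and extends the result with the slice when the run is long enough.
import Mathlib
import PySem

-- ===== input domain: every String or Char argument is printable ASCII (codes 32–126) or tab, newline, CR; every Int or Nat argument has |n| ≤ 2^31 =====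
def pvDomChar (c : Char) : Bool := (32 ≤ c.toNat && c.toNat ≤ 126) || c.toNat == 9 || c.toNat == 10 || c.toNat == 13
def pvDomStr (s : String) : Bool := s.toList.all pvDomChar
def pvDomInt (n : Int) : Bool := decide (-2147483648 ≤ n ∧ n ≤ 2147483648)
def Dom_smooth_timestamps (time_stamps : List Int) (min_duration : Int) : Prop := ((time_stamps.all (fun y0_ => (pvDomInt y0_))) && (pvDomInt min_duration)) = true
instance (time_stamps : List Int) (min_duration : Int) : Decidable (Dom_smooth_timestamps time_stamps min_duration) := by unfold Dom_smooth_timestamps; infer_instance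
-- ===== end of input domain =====

-- B replaces A's stateful temp_group accumulator with a two-pointer maximal-run scan; objective: alternative (same cost).

-- ===== PORT A =====
-- A's for-loop over indices 1..n-1, carrying (filtered, temp_group); here the loop walks
-- the tail structurally, `prev` being time_stamps[i-1] and the state unchanged.
def smoothA_go (min_duration : Int) (prev : Int) (rest : List Int)
    (filtered temp_group : List Int) : List Int :=
  match rest with
  | [] => if min_duration ≤ (temp_group.length : Int) then filtered ++ temp_group else filtered
  | x :: xs =>
    if x = prev + 1 then
      smoothA_go min_duration x xs filtered (temp_group ++ [x])
    else
      smoothA_go min_duration x xs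
        (if min_duration ≤ (temp_group.length : Int) then filtered ++ temp_group else filtered)
        [x]

def smooth_timestamps (time_stamps : List Int) (min_duration : Int) : List Int :=
  match time_stamps with
  | [] => []
  | t0 :: rest => smoothA_go min_duration t0 rest [] [t0]

-- ===== PORT B =====
-- Source B's inner while loop: starting after `prev`, collect the rest of the maximal
-- consecutive run (the slice time_stamps[i+1:j]) and return it with the remainder.
def takeRun (prev : Int) (xs : List Int) : List Int × List Int :=
  match xs with
  | [] => ([], [])
  | x :: xs' =>
    if x = prev + 1 then
      let p := takeRun x xs'
      (x :: p.1, p.2)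
    else ([], x :: xs')

theorem takeRun_snd_length_le (prev : Int) (xs : List Int) :
    (takeRun prev xs).2.length ≤ xs.length := by
  induction xs generalizing prev with
  | nil => simp [takeRun]
  | cons x xs' ih =>
    simp only [takeRun]
    split
    · exact le_trans (ih x) (Nat.le_succ _)
    · simp

-- Source B's outer while loop: cut off one maximal run at a time, keep it if long enough.
def smoothB_runs (min_duration : Int) (xs : List Int) : List Int :=
  match xs with
  | [] => []
  | x :: xs' =>
    let p := takeRun x xs'
    let run := x :: p.1
    (if min_duration ≤ (run.length : Int) then run else []) ++ smoothB_runs min_duration p.2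
termination_by xs.length
decreasing_by
  simpa using Nat.lt_succ_of_le (takeRun_snd_length_le x xs')

def smooth_timestamps_alt (time_stamps : List Int) (min_duration : Int) : List Int :=
  smoothB_runs min_duration time_stamps

-- ===== PRECONDITION & SPEC =====
def Spec_smooth_timestamps (time_stamps : List Int) (min_duration : Int) (out : List Int) : Prop := out = smooth_timestamps_alt time_stamps min_duration
instance (time_stamps : List Int) (min_duration : Int) (out : List Int) : Decidable (Spec_smooth_timestamps time_stamps min_duration out) := by unfold Spec_smooth_timestamps; infer_instance

-- ===== CLAIM (what is proved, stated in full; the proofs are below) =====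
def Claim_equal_smooth_timestamps : Prop := ∀ (time_stamps : List Int) (min_duration : Int), Dom_smooth_timestamps time_stamps min_duration → Spec_smooth_timestamps time_stamps min_duration (smooth_timestamps time_stamps min_duration)

-- ===== LEMMAS AND PROOFS =====

theorem smoothA_go_eq (md : Int) (rest : List Int) :
    ∀ (prev : Int) (filtered temp : List Int),
    smoothA_go md prev rest filtered temp =
      filtered ++
        ((if md ≤ ((temp ++ (takeRun prev rest).1).length : Int)
          then temp ++ (takeRun prev rest).1 else []) ++
         smoothB_runs md (takeRun prev rest).2) := by
  induction rest with
  | nil =>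
    intro prev filtered temp
    simp only [smoothA_go, takeRun, smoothB_runs, List.append_nil]
    split_ifs <;> simp
  | cons x xs ih =>
    intro prev filtered temp
    by_cases h : x = prev + 1
    · simp only [smoothA_go, takeRun, if_pos h]
      rw [ih x filtered (temp ++ [x])]
      have e : (temp ++ [x]) ++ (takeRun x xs).1 = temp ++ (x :: (takeRun x xs).1) := by simp
      rw [e]
    · simp only [smoothA_go, takeRun, if_neg h]
      rw [ih x (if md ≤ ((temp.length : Nat) : Int) then filtered ++ temp else filtered) [x]]
      have hruns : smoothB_runs md (x :: xs) =
          (if md ≤ (((x :: (takeRun x xs).1).length : Nat) : Int)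
            then x :: (takeRun x xs).1 else []) ++ smoothB_runs md (takeRun x xs).2 := by
        simp only [smoothB_runs]
      rw [hruns]
      by_cases h1 : md ≤ ((temp.length : Nat) : Int) <;> simp [h1]

-- ===== VERDICT (by name: the statement is the Claim_ definition above) =====
theorem smooth_timestamps_spec : Claim_equal_smooth_timestamps := by
  intro ts md _
  unfold Spec_smooth_timestamps smooth_timestamps_alt
  cases ts with
  | nil => simp [smooth_timestamps, smoothB_runs]
  | cons t0 rest =>
    have h0 : smooth_timestamps (t0 :: rest) md = smoothA_go md t0 rest [] [t0] := rfl
    rw [h0, smoothA_go_eq md rest t0 [] [t0]]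
    have hruns : smoothB_runs md (t0 :: rest) =
        (if md ≤ (((t0 :: (takeRun t0 rest).1).length : Nat) : Int)
          then t0 :: (takeRun t0 rest).1 else []) ++ smoothB_runs md (takeRun t0 rest).2 := by
      simp only [smoothB_runs]
    rw [hruns]
    simp
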